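-- pv_equiv track=rewrite | github.com/omercelikors/regulate_json | regulate_json.py | replace_double_quote_as_single_quote
-- ===== SOURCE A (Python) =====
-- def replace_double_quote_as_single_quote(line, line_double_quote_idx_list):
-- 	if line.count('"') <= 2:
-- 		return f"{line}\n"
-- 	del line_double_quote_idx_list[0:3]
-- 	del line_double_quote_idx_list[-1]
-- 	if not line_double_quote_idx_list:
-- 		return f"{line}\n"
-- 	else:
-- 		new_line = ''
-- 		for idx, char in enumerate(line):
-- 			if idx in line_double_quote_idx_list:
-- 				new_line += '\''
-- 			else:
-- 				new_line += char
-- 		return f"{new_line}\n"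
-- ===== SOURCE B (Python) =====
-- def replace_double_quote_as_single_quote(line, line_double_quote_idx_list):
-- 	if line.count('"') <= 2:
-- 		return f"{line}\n"
-- 	del line_double_quote_idx_list[0:3]
-- 	del line_double_quote_idx_list[-1]
-- 	chars = list(line)
-- 	for idx in line_double_quote_idx_list:
-- 		if 0 <= idx < len(chars):
-- 			chars[idx] = "'"
-- 	return ''.join(chars) + '\n'
-- ===== Notes on version B (the rewrite author's own statement) =====
-- stated objective: simpler
-- what changed: B scatter-writes single quotes into a character list at the positions from the (trimmed) index list instead of scanning every character of the line with a membership test against the list; the empty-list early return becomes unnecessary because scatter over an empty list is a no-op.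
import Mathlib
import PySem

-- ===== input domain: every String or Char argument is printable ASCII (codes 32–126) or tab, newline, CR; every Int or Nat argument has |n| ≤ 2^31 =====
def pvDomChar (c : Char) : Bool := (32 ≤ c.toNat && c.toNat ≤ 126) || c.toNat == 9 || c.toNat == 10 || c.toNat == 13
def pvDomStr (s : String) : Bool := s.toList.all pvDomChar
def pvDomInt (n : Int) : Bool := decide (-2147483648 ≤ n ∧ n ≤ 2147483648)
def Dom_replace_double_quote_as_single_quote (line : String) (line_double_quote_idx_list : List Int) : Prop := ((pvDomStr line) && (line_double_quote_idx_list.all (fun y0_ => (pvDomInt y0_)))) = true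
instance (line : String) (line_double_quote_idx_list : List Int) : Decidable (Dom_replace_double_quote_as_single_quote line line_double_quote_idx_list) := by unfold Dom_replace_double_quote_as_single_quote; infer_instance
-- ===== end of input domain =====

-- B scatter-writes quotes at the listed indices instead of scanning every character with a
-- membership test (objective: simpler). Both programs mutate line_double_quote_idx_list in place
-- identically (two dels); the equivalence proved here is about the RETURN value only.

-- ===== PORT A =====
def replace_double_quote_as_single_quote (line : String) (line_double_quote_idx_list : List Int) : String :=
  if PySem.Str.count line "\"" ≤ 2 then line ++ "\n"
  else
    -- del [0:3] then del [-1]; Pre_ guarantees the list is nonempty at the del [-1]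
    let rest := (line_double_quote_idx_list.drop 3).dropLast
    if rest = [] then line ++ "\n"
    else
      let new_line := (PySem.List.enumerate line.toList).foldl
        (fun acc p => if p.1 ∈ rest then acc ++ "'" else acc ++ String.ofList [p.2]) ""
      new_line ++ "\n"

-- ===== PORT B =====
def replace_double_quote_as_single_quote_alt (line : String) (line_double_quote_idx_list : List Int) : String :=
  if PySem.Str.count line "\"" ≤ 2 then line ++ "\n"
  else
    let rest := (line_double_quote_idx_list.drop 3).dropLast
    let chars := rest.foldl
      (fun cs idx => if 0 ≤ idx ∧ idx < (cs.length : Int) then cs.set idx.toNat '\'' else cs)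
      line.toList
    String.ofList chars ++ "\n"

-- ===== PRECONDITION & SPEC =====
-- Pre_ excludes exactly the inputs where A raises IndexError: more than two '"' in line but
-- fewer than four indices in the list, so 'del line_double_quote_idx_list[-1]' hits an empty list.
def Pre_replace_double_quote_as_single_quote (line : String) (line_double_quote_idx_list : List Int) : Prop :=
  PySem.Str.count line "\"" ≤ 2 ∨ 4 ≤ line_double_quote_idx_list.length
instance (line : String) (line_double_quote_idx_list : List Int) : Decidable (Pre_replace_double_quote_as_single_quote line line_double_quote_idx_list) := by unfold Pre_replace_double_quote_as_single_quote; infer_instance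
def pvWitness_replace_double_quote_as_single_quote : String × List Int := ("a\"b\"c\"", [0, 1, 2, 3, 1])

def Spec_replace_double_quote_as_single_quote (line : String) (line_double_quote_idx_list : List Int) (out : String) : Prop := out = replace_double_quote_as_single_quote_alt line line_double_quote_idx_list
instance (line : String) (line_double_quote_idx_list : List Int) (out : String) : Decidable (Spec_replace_double_quote_as_single_quote line line_double_quote_idx_list out) := by unfold Spec_replace_double_quote_as_single_quote; infer_instance

-- ===== CLAIM (what is proved, stated in full; the proofs are below) =====
def Claim_equal_replace_double_quote_as_single_quote : Prop := ∀ (line : String) (line_double_quote_idx_list : List Int), Dom_replace_double_quote_as_single_quote line line_double_quote_idx_list → Pre_replace_double_quote_as_single_quote line line_double_quote_idx_list → Spec_replace_double_quote_as_single_quote line line_double_quote_idx_list (replace_double_quote_as_single_quote line line_double_quote_idx_list)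

-- ===== LEMMAS AND PROOFS =====

-- B's scatter fold preserves the length of the character list.
lemma scatter_length (l : List Int) (cs : List Char) :
    (l.foldl (fun cs idx => if 0 ≤ idx ∧ idx < (cs.length : Int) then cs.set idx.toNat '\'' else cs) cs).length
      = cs.length := by
  induction l generalizing cs with
  | nil => rfl
  | cons x t ih =>
    simp only [List.foldl_cons]
    rw [ih]
    split_ifs <;> simp

-- Element i of B's scatter result: a quote iff i occurs in the index list.
lemma scatter_getElem (l : List Int) (cs : List Char) (i : Nat) (h : i < cs.length) :
    (l.foldl (fun cs idx => if 0 ≤ idx ∧ idx < (cs.length : Int) then cs.set idx.toNat '\'' else cs) cs)[i]'(by rw [scatter_length]; exact h)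
      = if ((i : Int) ∈ l) then '\'' else cs[i] := by
  induction l generalizing cs with
  | nil => simp
  | cons x t ih =>
    simp only [List.foldl_cons]
    set cs' := (if 0 ≤ x ∧ x < (cs.length : Int) then cs.set x.toNat '\'' else cs) with hcs'
    have hlen : cs'.length = cs.length := by rw [hcs']; split_ifs <;> simp
    have hi' : i < cs'.length := by rw [hlen]; exact h
    rw [ih cs' hi']
    by_cases hmem : (i : Int) ∈ t
    · simp [hmem]
    · simp only [hmem, if_false, List.mem_cons, or_false]
      by_cases hx : (i : Int) = x
      · subst hx
        have hset : cs' = cs.set i '\'' := by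
          rw [hcs', if_pos ⟨Int.natCast_nonneg i, by exact_mod_cast h⟩, Int.toNat_natCast]
        simp [hset]
      · have hget : cs'[i]'hi' = cs[i] := by
          rcases Decidable.em (0 ≤ x ∧ x < (cs.length : Int)) with hg | hg
          · have hset : cs' = cs.set x.toNat '\'' := by rw [hcs', if_pos hg]
            simp only [hset, List.getElem_set]
            rw [if_neg (by omega)]
          · have hid : cs' = cs := by rw [hcs', if_neg hg]
            simp only [hid]
        simp [hx, hget]

-- A's character-by-character build equals mapping over the enumeration.
lemma build_toList (r : List Int) (cs : List Char) (s : Int) (acc : String) :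
    ((PySem.List.enumerate cs s).foldl
        (fun acc p => if p.1 ∈ r then acc ++ "'" else acc ++ String.ofList [p.2]) acc).toList
      = acc.toList ++ (PySem.List.enumerate cs s).map (fun p => if p.1 ∈ r then '\'' else p.2) := by
  induction cs generalizing s acc with
  | nil => simp [PySem.List.enumerate_nil]
  | cons c cs ih =>
    rw [PySem.List.enumerate_cons]
    simp only [List.foldl_cons, List.map_cons]
    rw [ih]
    by_cases hm : s ∈ r <;> simp [hm]

-- ===== VERDICT (by name: the statement is the Claim_ definition above) =====
theorem replace_double_quote_as_single_quote_spec : Claim_equal_replace_double_quote_as_single_quote := by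
  intro line l _ _
  show _ = _
  unfold replace_double_quote_as_single_quote replace_double_quote_as_single_quote_alt
  dsimp only
  split_ifs with h1 h2
  · rfl
  · -- rest = []: scatter over [] is the identity
    rw [h2]
    simp
  · -- main case: both sides build the same character list
    congr 1
    set rest := (l.drop 3).dropLast with hrest
    have key : ((PySem.List.enumerate line.toList (0:Int)).foldl
        (fun acc p => if p.1 ∈ rest then acc ++ "'" else acc ++ String.ofList [p.2]) "").toList
        = rest.foldl (fun cs idx => if 0 ≤ idx ∧ idx < (cs.length : Int) then cs.set idx.toNat '\'' else cs) line.toList := by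
      rw [build_toList]
      apply List.ext_getElem
      · simp [scatter_length, PySem.List.length_enumerate]
      · intro i hi1 hi2
        have hlt : i < line.toList.length := by
          simpa [PySem.List.length_enumerate] using hi1
        rw [scatter_getElem rest line.toList i hlt]
        simp [PySem.List.getElem_enumerate]
    calc ((PySem.List.enumerate line.toList (0:Int)).foldl
        (fun acc p => if p.1 ∈ rest then acc ++ "'" else acc ++ String.ofList [p.2]) "")
        = String.ofList (((PySem.List.enumerate line.toList (0:Int)).foldl
            (fun acc p => if p.1 ∈ rest then acc ++ "'" else acc ++ String.ofList [p.2]) "").toList) := by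
          simp
      _ = _ := by rw [key]
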